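-- pv_equiv track=rewrite | github.com/TKFRvisionOfficial/streaming-service-searcher | write_to_google_docs_table.py | rewrap_movies
-- ===== SOURCE A (Python) =====
-- def rewrap_movies(movies):
--     movie_dict = {}
--     for movie in movies:
--         if movies[movie] is not None:
--             services = {}
--             for country in movies[movie]:
--                 for service in movies[movie][country]:
--                     if service not in services:
--                         services[service] = []
--                     services[service].append(country)
--             movie_dict[movie] = services
--         else:
--             movie_dict[movie] = None
--     return movie_dict
-- ===== SOURCE B (Python) =====
-- def rewrap_movies(movies):
--     result = {}
--     for movie, table in movies.items():
--         if table is None: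
--             result[movie] = None
--         else:
--             pairs = [(s, c) for c, ss in table.items() for s in ss]
--             result[movie] = {s: [c for s2, c in pairs if s2 == s] for s, _ in pairs}
--     return result
-- ===== Notes on version B (the rewrite author's own statement) =====
-- stated objective: alternative
-- what changed: A groups in one incremental sweep, appending each country into services[service] as it scans; B first flattens each movie's table into a (service, country) event list, then builds the result dict by collecting, per service, the countries of its events from that list (the dict comprehension dedups the service keys in first-occurrence order).
import Mathlib
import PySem

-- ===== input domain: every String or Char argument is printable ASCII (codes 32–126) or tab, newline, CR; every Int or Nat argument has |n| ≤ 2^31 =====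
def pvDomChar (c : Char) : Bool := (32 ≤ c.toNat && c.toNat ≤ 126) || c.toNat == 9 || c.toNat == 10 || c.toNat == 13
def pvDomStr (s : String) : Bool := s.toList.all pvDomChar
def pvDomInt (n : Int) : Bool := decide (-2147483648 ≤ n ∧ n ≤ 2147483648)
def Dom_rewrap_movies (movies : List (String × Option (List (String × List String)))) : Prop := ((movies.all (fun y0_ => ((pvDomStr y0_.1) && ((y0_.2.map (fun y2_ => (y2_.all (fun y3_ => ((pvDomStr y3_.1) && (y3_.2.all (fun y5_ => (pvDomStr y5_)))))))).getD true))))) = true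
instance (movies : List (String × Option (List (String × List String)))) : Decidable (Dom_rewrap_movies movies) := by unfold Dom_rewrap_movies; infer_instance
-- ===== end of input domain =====

-- B replaces A's incremental grouping sweep (append country into services[service] while
-- scanning) by flattening each table to a (service, country) event list and then collecting,
-- for each service, its countries from that list; objective: alternative decomposition.
-- Dicts are modelled as assoc lists; both ports normalise them with PySem.Dict.ofList
-- (Python dict building: last value wins, first position kept), so they are total.

-- ===== PORT A =====
-- for service in movies[movie][country]: if service not in services: services[service] = []; services[service].append(country)
def rewrapSvcStep (c : String) (svcs : PySem.Dict String (List String)) (s : String) :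
    PySem.Dict String (List String) :=
  let svcs := if svcs.contains s then svcs else svcs.insert s []
  svcs.modify s [] (· ++ [c])

-- for country in movies[movie]: inner loop
def rewrapServicesA (d : List (String × List String)) : PySem.Dict String (List String) :=
  d.foldl (fun svcs q => q.2.foldl (rewrapSvcStep q.1) svcs) PySem.Dict.empty

def rewrap_movies (movies : List (String × Option (List (String × List String)))) :
    List (String × Option (List (String × List String))) :=
  ((PySem.Dict.ofList movies).items.foldl
    (fun md p =>
      match p.2 with
      | some d => md.insert p.1 (some (rewrapServicesA (PySem.Dict.ofList d).items).items)
      | none => md.insert p.1 none)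
    PySem.Dict.empty).items

-- ===== PORT B =====
-- pairs = [(s, c) for c, ss in table.items() for s in ss]
-- {s: [c for s2, c in pairs if s2 == s] for s, _ in pairs} : a dict comprehension keeps the
-- FIRST position of a duplicate key, and here the value depends only on the key, so it is the
-- map over the ordered-dedup (PySem.Set.ofList) of the keys of pairs.
def rewrapInnerB (d : List (String × List String)) : List (String × List String) :=
  let pairs := d.flatMap (fun q => q.2.map (fun s => (s, q.1)))
  (PySem.Set.ofList (pairs.map (fun p => p.1))).map
    (fun s => (s, (pairs.filter (fun p => p.1 == s)).map (fun p => p.2)))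

def rewrap_movies_alt (movies : List (String × Option (List (String × List String)))) :
    List (String × Option (List (String × List String))) :=
  ((PySem.Dict.ofList movies).items.foldl
    (fun md p =>
      match p.2 with
      | some d => md.insert p.1 (some (rewrapInnerB (PySem.Dict.ofList d).items))
      | none => md.insert p.1 none)
    PySem.Dict.empty).items

-- ===== PRECONDITION & SPEC =====
def Spec_rewrap_movies (movies : List (String × Option (List (String × List String)))) (out : List (String × Option (List (String × List String)))) : Prop := out = rewrap_movies_alt movies
instance (movies : List (String × Option (List (String × List String)))) (out : List (String × Option (List (String × List String)))) : Decidable (Spec_rewrap_movies movies out) := by unfold Spec_rewrap_movies; infer_instance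

-- ===== CLAIM (what is proved, stated in full; the proofs are below) =====
def Claim_equal_rewrap_movies : Prop := ∀ (movies : List (String × Option (List (String × List String)))), Dom_rewrap_movies movies → Spec_rewrap_movies movies (rewrap_movies movies)

-- ===== LEMMAS AND PROOFS =====

theorem rewrapSvcStep_eq_modify (c : String) (svcs : PySem.Dict String (List String)) (s : String) :
    rewrapSvcStep c svcs s = svcs.modify s [] (· ++ [c]) := by
  by_cases h : svcs.contains s
  · simp [rewrapSvcStep, h]
  · have h' : svcs.contains s = false := by simpa using h
    simp [rewrapSvcStep, h', PySem.Dict.modify,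
      PySem.Dict.getD_of_not_contains _ _ h', PySem.Dict.insert_insert_self]

theorem foldl_flatMap_gen {α β σ : Type} (d : List α) (f : α → List β) (g : σ → β → σ)
    (init : σ) :
    (d.flatMap f).foldl g init = d.foldl (fun a x => (f x).foldl g a) init := by
  induction d generalizing init with
  | nil => rfl
  | cons q t ih => simp [List.foldl_append, ih]

-- the two nested loops of A are one loop over the flattened (service, country) event list
theorem rewrapServicesA_eq_flat (d : List (String × List String)) :
    rewrapServicesA d =
      (d.flatMap (fun q => q.2.map (fun s => (s, q.1)))).foldl
        (fun dd p => dd.modify p.1 [] (· ++ [p.2])) PySem.Dict.empty := by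
  unfold rewrapServicesA
  rw [foldl_flatMap_gen]
  congr 1
  funext a q
  rw [List.foldl_map]
  congr 1
  funext a' s
  exact rewrapSvcStep_eq_modify q.1 a' s

theorem inner_eq (d : List (String × List String)) :
    (rewrapServicesA d).items = rewrapInnerB d := by
  rw [rewrapServicesA_eq_flat, rewrapInnerB]
  set l := d.flatMap (fun q => q.2.map (fun s => (s, q.1))) with hl
  have hnd : (l.foldl (fun dd p => dd.modify p.1 [] (· ++ [p.2]))
      (PySem.Dict.empty : PySem.Dict String (List String))).keys.Nodup :=
    PySem.Dict.nodup_keys_foldl_modify_key l (fun p => p.1) [] (fun _ p v => v ++ [p.2])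
      PySem.Dict.empty (by simp)
  have h2 : (l.foldl (fun dd p => dd.modify p.1 [] (· ++ [p.2]))
      (PySem.Dict.empty : PySem.Dict String (List String))).keys
      = PySem.Set.update (PySem.Dict.empty : PySem.Dict String (List String)).keys
          (l.map (fun p => p.1)) :=
    PySem.Dict.keys_foldl_modify_key l (fun p => p.1) [] (fun _ p v => v ++ [p.2])
      PySem.Dict.empty
  rw [PySem.Dict.items_eq_map_keys _ hnd [], h2]
  have hkeys : PySem.Set.update (PySem.Dict.empty : PySem.Dict String (List String)).keys
      (l.map (fun p => p.1)) = PySem.Set.ofList (l.map (fun p => p.1)) := rfl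
  rw [hkeys]
  refine List.map_congr_left (fun s _ => ?_)
  congr 1
  rw [PySem.Dict.getD_foldl_modify_append, PySem.Dict.getD_empty, List.nil_append]

-- ===== VERDICT (by name: the statement is the Claim_ definition above) =====
theorem rewrap_movies_spec : Claim_equal_rewrap_movies := by
  intro movies _
  unfold Spec_rewrap_movies rewrap_movies rewrap_movies_alt
  congr 2
  funext md p
  cases h : p.2 with
  | none => simp
  | some d => simp [inner_eq]
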